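-- pv_equiv track=rewrite | github.com/bienew22/algorithm-training | Python3/프로그래머스/3/468374. 카카오 앱 정리하기/카카오 앱 정리하기.py | parse_app
-- ===== SOURCE A (Python) =====
-- def parse_app(board, H, W):
--     res = {}
--
--     for y in range(H):
--         for x in range(W):
--             if board[y][x] == 0 or board[y][x] in res:
--                 continue
--
--             app_size = 1
--
--             while y + app_size < H and board[y + app_size][x] == board[y][x]:
--                 app_size += 1
--
--             res[board[y][x]] = [x, y, app_size - 1]
--     return res
-- ===== SOURCE B (Python) =====
-- def parse_app(board, H, W):
--     # Bottom-up DP: runs[y][x] = length of the run of equal values downward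
--     # from (y, x) within the first H rows; then one row-major scan records
--     # each app's first cell.  O(H*W) instead of A's O(H^2 * W) worst case.
--     runs = []
--     below = None
--     y = H - 1
--     while y >= 0:
--         row = []
--         for x in range(W):
--             v = board[y][x]
--             b = below[x] if below is not None and board[y + 1][x] == v else 0
--             row.append(b + 1)
--         runs.append(row)
--         below = row
--         y -= 1
--     runs.reverse()
--
--     res = {}
--     for y in range(H):
--         for x in range(W):
--             v = board[y][x]
--             if v != 0 and v not in res:
--                 res[v] = [x, y, runs[y][x] - 1]
--     return res
-- ===== Notes on version B (the rewrite author's own statement) =====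
-- stated objective: faster
-- what changed: Replaces A's per-app downward re-scan (a while loop inside the board scan) with a bottom-up dynamic-programming pass that computes every cell's downward run length once, followed by one row-major scan that records each app's first cell.
import Mathlib
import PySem

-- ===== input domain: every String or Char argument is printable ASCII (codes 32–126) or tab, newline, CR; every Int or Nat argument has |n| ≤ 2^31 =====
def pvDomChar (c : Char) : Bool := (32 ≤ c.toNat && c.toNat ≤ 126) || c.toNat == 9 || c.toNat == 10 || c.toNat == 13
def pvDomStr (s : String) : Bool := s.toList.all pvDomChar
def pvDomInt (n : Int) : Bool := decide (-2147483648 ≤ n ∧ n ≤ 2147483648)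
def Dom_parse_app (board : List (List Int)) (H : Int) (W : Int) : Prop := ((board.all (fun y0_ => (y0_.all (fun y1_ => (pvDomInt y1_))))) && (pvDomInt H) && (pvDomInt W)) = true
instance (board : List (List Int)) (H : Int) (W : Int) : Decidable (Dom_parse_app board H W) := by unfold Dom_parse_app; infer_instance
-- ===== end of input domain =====

-- B replaces A's per-app downward re-scan by one bottom-up run-length pass plus
-- one recording scan (asymptotically fewer cell reads on tall boards).

-- board[y][x] (in-range on every input Pre_ admits; default only off-range)
def cellAt (board : List (List Int)) (y x : Int) : Int :=
  PySem.List.pyGetD (PySem.List.pyGetD board y []) x 0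

-- ===== PORT A =====
-- the 'while y + app_size < H and board[y+app_size][x] == board[y][x]' loop;
-- fuel (H - y).toNat is enough: app_size grows each step and the guard needs y + app_size < H
def sizeLoopA (board : List (List Int)) (H x y v : Int) : Nat → Int → Int
  | 0, s => s
  | Nat.succ f, s =>
      if y + s < H ∧ cellAt board (y + s) x = v then sizeLoopA board H x y v f (s + 1) else s

def parse_app (board : List (List Int)) (H : Int) (W : Int) : List (Int × List Int) :=
  ((PySem.List.pyRange 0 H 1).foldl (fun res y =>
    (PySem.List.pyRange 0 W 1).foldl (fun res x =>
      if cellAt board y x = 0 ∨ (PySem.Dict.get? res (cellAt board y x)).isSome then res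
      else PySem.Dict.insert res (cellAt board y x)
        [x, y, sizeLoopA board H x y (cellAt board y x) (H - y).toNat 1 - 1]) res)
    (PySem.Dict.empty : PySem.Dict Int (List Int))).items

-- ===== PORT B =====
-- 'row = []; for x in range(W): row.append(…)'
def rowB (board : List (List Int)) (H W y : Int) (below : Option (List Int)) : List Int :=
  (PySem.List.pyRange 0 W 1).foldl (fun row x =>
    let v := cellAt board y x
    let b : Int :=
      match below with
      | some bl => if cellAt board (y + 1) x = v then PySem.List.pyGetD bl x 0 else 0
      | none => 0
    row ++ [b + 1]) []

-- 'while y >= 0: … runs.append(row); below = row; y -= 1'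
def buildB (board : List (List Int)) (H W : Int) (y : Int) (runs : List (List Int))
    (below : Option (List Int)) : List (List Int) :=
  if 0 ≤ y then
    let row := rowB board H W y below
    buildB board H W (y - 1) (runs ++ [row]) (some row)
  else runs
termination_by (y + 1).toNat
decreasing_by omega

def parse_app_alt (board : List (List Int)) (H : Int) (W : Int) : List (Int × List Int) :=
  let runs := (buildB board H W (H - 1) [] none).reverse
  ((PySem.List.pyRange 0 H 1).foldl (fun res y =>
    (PySem.List.pyRange 0 W 1).foldl (fun res x =>
      if cellAt board y x ≠ 0 ∧ ¬ (PySem.Dict.get? res (cellAt board y x)).isSome then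
        PySem.Dict.insert res (cellAt board y x)
          [x, y, PySem.List.pyGetD (PySem.List.pyGetD runs y []) x 0 - 1]
      else res) res)
    (PySem.Dict.empty : PySem.Dict Int (List Int))).items

-- ===== PRECONDITION & SPEC =====
-- Pre_ = exactly where Python A returns: it indexes board[y][x] for y < H, x < W
-- (and rows below within the first H rows), so it raises IndexError iff some of
-- those accesses is out of range; with H ≤ 0 or W ≤ 0 no cell is read at all.
def Pre_parse_app (board : List (List Int)) (H : Int) (W : Int) : Prop :=
  H ≤ 0 ∨ W < 1 ∨ (H ≤ (board.length : Int) ∧ ∀ row ∈ board.take H.toNat, W ≤ (row.length : Int))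
instance (board : List (List Int)) (H : Int) (W : Int) : Decidable (Pre_parse_app board H W) := by
  unfold Pre_parse_app; infer_instance

def pvWitness_parse_app : List (List Int) × Int × Int := ([[1, 1, 0], [1, 2, 2]], 2, 3)

def Spec_parse_app (board : List (List Int)) (H : Int) (W : Int) (out : List (Int × List Int)) : Prop := out = parse_app_alt board H W
instance (board : List (List Int)) (H : Int) (W : Int) (out : List (Int × List Int)) : Decidable (Spec_parse_app board H W out) := by unfold Spec_parse_app; infer_instance

-- ===== CLAIM (what is proved, stated in full; the proofs are below) =====
def Claim_equal_parse_app : Prop := ∀ (board : List (List Int)) (H : Int) (W : Int), Dom_parse_app board H W → Pre_parse_app board H W → Spec_parse_app board H W (parse_app board H W)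

-- ===== LEMMAS AND PROOFS =====

-- downward run count of value v in column x starting at row p, bounded by H
def cntWF (board : List (List Int)) (H x p v : Int) : Int :=
  if h : p < H ∧ cellAt board p x = v then 1 + cntWF board H x (p + 1) v else 0
termination_by (H - p).toNat
decreasing_by omega

-- the common value: A's app_size and B's runs[y][x]
def Dv (board : List (List Int)) (H y x : Int) : Int :=
  1 + cntWF board H x (y + 1) (cellAt board y x)

def rowSpecL (board : List (List Int)) (H W y : Int) : List Int :=
  (PySem.List.pyRange 0 W 1).map (fun x => Dv board H y x)

lemma sizeLoopA_eq (board : List (List Int)) (H x y v : Int) :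
    ∀ (f : Nat) (s : Int), (H - y - s).toNat ≤ f →
      sizeLoopA board H x y v f s = s + cntWF board H x (y + s) v := by
  intro f
  induction f with
  | zero =>
      intro s hs
      rw [sizeLoopA, cntWF, dif_neg (by rintro ⟨h1, _⟩; omega), add_zero]
  | succ f ih =>
      intro s hs
      rw [sizeLoopA]
      by_cases hc : y + s < H ∧ cellAt board (y + s) x = v
      · rw [if_pos hc, ih (s + 1) (by omega)]
        conv_rhs => rw [cntWF]
        rw [dif_pos hc, show y + (s + 1) = y + s + 1 from by ring]
        ring
      · rw [if_neg hc, cntWF, dif_neg hc, add_zero]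

lemma rowB_eq (board : List (List Int)) (H W y : Int)
    (below : Option (List Int))
    (hinv : (below = none ∧ y = H - 1) ∨ (below = some (rowSpecL board H W (y + 1)) ∧ y + 1 < H)) :
    rowB board H W y below = rowSpecL board H W y := by
  unfold rowB rowSpecL
  rw [PySem.List.foldl_append_singleton_eq_map, List.nil_append]
  apply List.map_congr_left
  intro x hx
  have hxb := (PySem.List.mem_pyRange_one).mp hx
  rcases hinv with ⟨hb, hy⟩ | ⟨hb, hy⟩
  · subst hb
    simp only [Dv]
    rw [cntWF, dif_neg (by rintro ⟨h1, _⟩; omega)]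
    ring
  · subst hb
    show (if cellAt board (y + 1) x = cellAt board y x then
        PySem.List.pyGetD (rowSpecL board H W (y + 1)) x 0 else 0) + 1 = Dv board H y x
    rw [show (PySem.List.pyGetD (rowSpecL board H W (y + 1)) x 0)
          = Dv board H (y + 1) x from by
      unfold rowSpecL
      exact PySem.List.pyGetD_map_pyRange_of_nonneg _ W x 0 hxb.1 hxb.2]
    simp only [Dv]
    by_cases hc : cellAt board (y + 1) x = cellAt board y x
    · rw [if_pos hc]
      rw [show cntWF board H x (y + 1) (cellAt board y x)
            = 1 + cntWF board H x (y + 1 + 1) (cellAt board y x) from by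
        rw [cntWF, dif_pos ⟨hy, hc⟩]]
      rw [show cntWF board H x (y + 1 + 1) (cellAt board y x)
            = cntWF board H x (y + 1 + 1) (cellAt board (y + 1) x) from by rw [hc]]
      ring
    · rw [if_neg hc]
      rw [show cntWF board H x (y + 1) (cellAt board y x) = 0 from by
        rw [cntWF, dif_neg (by rintro ⟨_, h2⟩; exact hc h2)]]
      ring

lemma buildB_eq (board : List (List Int)) (H W : Int) :
    ∀ (n : Nat) (y : Int) (runs : List (List Int)) (below : Option (List Int)),
      y < H → (y + 1).toNat = n →
      ((below = none ∧ y = H - 1) ∨ (below = some (rowSpecL board H W (y + 1)) ∧ y + 1 < H)) →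
      buildB board H W y runs below
        = runs ++ ((List.range (y + 1).toNat).map (fun (i : Nat) => rowSpecL board H W (i : Int))).reverse := by
  intro n
  induction n with
  | zero =>
      intro y runs below hy hn _
      rw [buildB, if_neg (by omega)]
      rw [hn]
      simp
  | succ n ih =>
      intro y runs below hy hn hinv
      have h0y : 0 ≤ y := by omega
      rw [buildB, if_pos h0y]
      rw [rowB_eq board H W y below hinv]
      rw [ih (y - 1) (runs ++ [rowSpecL board H W y]) (some (rowSpecL board H W y))
            (by omega) (by omega)
            (Or.inr ⟨by rw [show y - 1 + 1 = y from by ring], by omega⟩)]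
      rw [show (y - 1 + 1).toNat = n from by omega, show (y + 1).toNat = n + 1 from hn]
      rw [List.range_succ, List.map_append, List.reverse_append]
      simp only [List.map_cons, List.map_nil, List.reverse_cons, List.reverse_nil,
        List.nil_append, List.append_assoc, List.singleton_append]
      rw [show ((n : Int)) = y from by omega]

lemma runsFinal_eq (board : List (List Int)) (H W : Int) :
    (buildB board H W (H - 1) [] none).reverse
      = (List.range H.toNat).map (fun (i : Nat) => rowSpecL board H W (i : Int)) := by
  rw [buildB_eq board H W (H - 1 + 1).toNat (H - 1) [] none (by omega) rfl (Or.inl ⟨rfl, rfl⟩)]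
  rw [show (H - 1 + 1).toNat = H.toNat from by omega]
  simp

lemma runs_lookup (board : List (List Int)) (H W y x : Int)
    (hy : 0 ≤ y) (hyH : y < H) (hx : 0 ≤ x) (hxW : x < W) :
    PySem.List.pyGetD
      (PySem.List.pyGetD ((buildB board H W (H - 1) [] none).reverse) y []) x 0
      = Dv board H y x := by
  rw [runsFinal_eq]
  rw [PySem.List.pyGetD_of_nonneg _ ([] : List Int) hy]
  rw [PySem.List.getD_map_range _ H.toNat y.toNat [] (by omega)]
  rw [show ((y.toNat : Int)) = y from by omega]
  unfold rowSpecL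
  exact PySem.List.pyGetD_map_pyRange_of_nonneg _ W x 0 hx hxW

-- ===== VERDICT (by name: the statement is the Claim_ definition above) =====
theorem parse_app_spec : Claim_equal_parse_app := by
  intro board H W _ _
  unfold Spec_parse_app parse_app parse_app_alt
  congr 1
  apply PySem.List.foldl_congr_mem
  intro res y hy
  have hyb := (PySem.List.mem_pyRange_one).mp hy
  apply PySem.List.foldl_congr_mem
  intro res x hx
  have hxb := (PySem.List.mem_pyRange_one).mp hx
  have hsize : sizeLoopA board H x y (cellAt board y x) (H - y).toNat 1 = Dv board H y x := by
    rw [sizeLoopA_eq board H x y (cellAt board y x) (H - y).toNat 1 (by omega)]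
    unfold Dv; ring
  have hrun := runs_lookup board H W y x hyb.1 hyb.2 hxb.1 hxb.2
  by_cases h0 : cellAt board y x = 0
  · rw [if_pos (Or.inl h0), if_neg (by rintro ⟨hne, _⟩; exact hne h0)]
  · by_cases hs : (PySem.Dict.get? res (cellAt board y x)).isSome
    · rw [if_pos (Or.inr hs), if_neg (by rintro ⟨_, hns⟩; exact hns hs)]
    · rw [if_neg (by rintro (h | h); exacts [h0 h, hs h]), if_pos ⟨h0, hs⟩, hsize, hrun]
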